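-- pv_equiv track=rewrite | github.com/mbhall88/bam_slice | bam_slice/bam_slice.py | handle_nones
-- ===== SOURCE A (Python) =====
-- from typing import List, Tuple
--
-- def handle_nones(aligned_pairs: List[Tuple[int, int]]) -> \
--         Tuple[List[int], List[int]]:
--     """Replaces all instances of None with the preceeding element.
--
--     Args:
--         aligned_pairs: A list of tuples of two integers.
--
--     Returns:
--         Two lists (in a tuple) that are the "unzipping" of the list of tuples
--         passed in. All instances of None are replaced with the previous element
--         in that position of the tuple (or -1 if at the start).
--
--     Example:
--         >>> aligned_pairs = [(1, 1), (None, 2), (2, None)]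
--         >>> handle_nones(aligned_pairs)
--         ([1, 1, 2], [1, 2, 2])
--
--     """
--     handled_ref_positions = []
--     handled_read_positions = []
--     previous_ref_pos = -1
--     previous_read_pos = -1
--     for read_pos, ref_pos in aligned_pairs:
--         if ref_pos is None:
--             handled_ref_positions.append(previous_ref_pos)
--         else:
--             handled_ref_positions.append(ref_pos)
--             previous_ref_pos = ref_pos
--
--         if read_pos is None:
--             handled_read_positions.append(previous_read_pos)
--         else:
--             handled_read_positions.append(read_pos)
--             previous_read_pos = read_pos
--     return handled_read_positions, handled_ref_positions
-- ===== SOURCE B (Python) =====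
-- def _fill(col):
--     # Segment (run-length) construction: collect the known entries with their
--     # positions, then emit each value repeated up to the next known position.
--     anchors = [(i, v) for i, v in enumerate(col) if v is not None]
--     bounds = [i for i, _ in anchors] + [len(col)]
--     out = [-1] * bounds[0]
--     for (i, v), nxt in zip(anchors, bounds[1:]):
--         out += [v] * (nxt - i)
--     return out
--
--
-- def handle_nones(aligned_pairs):
--     reads = [p[0] for p in aligned_pairs]
--     refs = [p[1] for p in aligned_pairs]
--     return _fill(reads), _fill(refs)
-- ===== Notes on version B (the rewrite author's own statement) =====
-- stated objective: alternative
-- what changed: Replaces A's element-by-element pass carrying previous-value state with an unzip plus a run-length construction: each column's non-None entries are collected as (index, value) anchors and the output is built by replicating each anchor value up to the next anchor's index (leading gap filled with -1).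
import Mathlib
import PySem

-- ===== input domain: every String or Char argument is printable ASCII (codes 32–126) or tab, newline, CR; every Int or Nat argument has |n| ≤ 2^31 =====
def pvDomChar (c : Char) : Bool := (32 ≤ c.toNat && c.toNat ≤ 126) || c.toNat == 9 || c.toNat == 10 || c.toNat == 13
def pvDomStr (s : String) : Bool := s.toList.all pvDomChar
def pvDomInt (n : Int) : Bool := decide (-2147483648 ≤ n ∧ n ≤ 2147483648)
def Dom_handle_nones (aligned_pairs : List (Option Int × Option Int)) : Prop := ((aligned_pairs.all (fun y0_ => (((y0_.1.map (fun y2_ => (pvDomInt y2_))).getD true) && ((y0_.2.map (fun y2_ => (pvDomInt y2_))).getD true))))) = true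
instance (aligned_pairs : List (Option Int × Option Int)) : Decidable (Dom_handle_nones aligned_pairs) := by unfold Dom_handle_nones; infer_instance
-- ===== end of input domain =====

-- B replaces A's stateful element-by-element pass with an unzip plus a run-length
-- construction from (index, value) anchors per column (alternative decomposition).


-- ===== PORT A =====
-- A's loop: one pass over the pairs carrying previous_ref_pos and previous_read_pos;
-- branches in the source order (ref first, then read).
def handle_nones_go (ps : List (Option Int × Option Int)) (previous_ref_pos previous_read_pos : Int) : List Int × List Int :=
  match ps with
  | [] => ([], [])
  | (read_pos, ref_pos) :: rest =>
    let (refv, prev_ref') :=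
      match ref_pos with
      | none => (previous_ref_pos, previous_ref_pos)
      | some r => (r, r)
    let (readv, prev_read') :=
      match read_pos with
      | none => (previous_read_pos, previous_read_pos)
      | some r => (r, r)
    let (reads, refs) := handle_nones_go rest prev_ref' prev_read'
    (readv :: reads, refv :: refs)

def handle_nones (aligned_pairs : List (Option Int × Option Int)) : List Int × List Int :=
  handle_nones_go aligned_pairs (-1) (-1)

-- ===== PORT B =====
-- anchors = [(i, v) for i, v in enumerate(col) if v is not None]
def anchorsGo (xs : List (Option Int)) (i : Nat) : List (Nat × Int) :=
  match xs with
  | [] => []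
  | none :: rest => anchorsGo rest (i + 1)
  | some v :: rest => (i, v) :: anchorsGo rest (i + 1)

-- _fill: leading gap of -1s, then each anchor value replicated up to the next bound
def fillColumn (col : List (Option Int)) : List Int :=
  let anchors := anchorsGo col 0
  let bounds := anchors.map (·.1) ++ [col.length]
  let out0 := List.replicate (bounds.headD 0) (-1 : Int)
  (anchors.zip bounds.tail).foldl
    (fun out p => out ++ List.replicate (p.2 - p.1.1) p.1.2) out0

def handle_nones_alt (aligned_pairs : List (Option Int × Option Int)) : List Int × List Int :=
  (fillColumn (aligned_pairs.map (·.1)), fillColumn (aligned_pairs.map (·.2)))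

-- ===== PRECONDITION & SPEC =====
def Spec_handle_nones (aligned_pairs : List (Option Int × Option Int)) (out : List Int × List Int) : Prop := out = handle_nones_alt aligned_pairs
instance (aligned_pairs : List (Option Int × Option Int)) (out : List Int × List Int) : Decidable (Spec_handle_nones aligned_pairs out) := by unfold Spec_handle_nones; infer_instance

-- ===== CLAIM (what is proved, stated in full; the proofs are below) =====
def Claim_equal_handle_nones : Prop := ∀ (aligned_pairs : List (Option Int × Option Int)), Dom_handle_nones aligned_pairs → Spec_handle_nones aligned_pairs (handle_nones aligned_pairs)

-- ===== LEMMAS AND PROOFS =====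
-- forward-fill characterization used as the middle ground between the two ports
def ffill (xs : List (Option Int)) (prev : Int) : List Int :=
  match xs with
  | [] => []
  | none :: rest => prev :: ffill rest prev
  | some x :: rest => x :: ffill rest x

theorem handle_nones_go_eq (ps : List (Option Int × Option Int)) (pr prd : Int) :
    handle_nones_go ps pr prd = (ffill (ps.map (·.1)) prd, ffill (ps.map (·.2)) pr) := by
  induction ps generalizing pr prd with
  | nil => simp [handle_nones_go, ffill]
  | cons p rest ih =>
    obtain ⟨read, ref⟩ := p
    cases read <;> cases ref <;> simp [handle_nones_go, ffill, ih]

theorem foldl_append_repl (l : List ((Nat × Int) × Nat)) (acc : List Int) :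
    l.foldl (fun out p => out ++ List.replicate (p.2 - p.1.1) p.1.2) acc
      = acc ++ l.flatMap (fun p => List.replicate (p.2 - p.1.1) p.1.2) := by
  induction l generalizing acc with
  | nil => simp
  | cons a l ih => simp [List.foldl, ih]

def hIdx (col : List (Option Int)) (i : Nat) : Nat :=
  (((anchorsGo col i).map (·.1)) ++ [i + col.length]).headD 0

theorem hIdx_cons_none (rest : List (Option Int)) (i : Nat) :
    hIdx (none :: rest) i = hIdx rest (i + 1) := by
  simp only [hIdx, anchorsGo, List.length_cons]
  rw [show i + (rest.length + 1) = (i + 1) + rest.length by omega]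

theorem hIdx_ge (col : List (Option Int)) (i : Nat) : i ≤ hIdx col i := by
  induction col generalizing i with
  | nil => simp [hIdx, anchorsGo]
  | cons x rest ih =>
    cases x with
    | none =>
      rw [hIdx_cons_none]
      have := ih (i + 1)
      omega
    | some v => simp [hIdx, anchorsGo]

theorem fill_go (col : List (Option Int)) (i : Nat) (prev : Int) :
    List.replicate (hIdx col i - i) prev ++
      ((anchorsGo col i).zip (((anchorsGo col i).map (·.1)) ++ [i + col.length]).tail).flatMap
        (fun p => List.replicate (p.2 - p.1.1) p.1.2)
      = ffill col prev := by
  induction col generalizing i prev with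
  | nil => simp [hIdx, anchorsGo, ffill]
  | cons x rest ih =>
    cases x with
    | none =>
      simp only [anchorsGo, List.length_cons, ffill]
      rw [show i + (rest.length + 1) = (i + 1) + rest.length by omega,
          hIdx_cons_none]
      have hge := hIdx_ge rest (i + 1)
      rw [show hIdx rest (i + 1) - i = (hIdx rest (i + 1) - (i + 1)) + 1 by omega,
          List.replicate_succ, List.cons_append]
      rw [ih (i + 1) prev]
    | some v =>
      simp only [anchorsGo, List.length_cons, ffill, List.map_cons, List.cons_append,
        List.tail_cons]
      have hIdx_here : hIdx (some v :: rest) i = i := by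
        simp [hIdx, anchorsGo]
      rw [hIdx_here]
      simp only [Nat.sub_self, List.replicate_zero, List.nil_append]
      rw [show i + (rest.length + 1) = (i + 1) + rest.length by omega]
      have ihv := ih (i + 1) v
      cases hM : (anchorsGo rest (i + 1)).map (·.1) with
      | nil =>
        have hA : anchorsGo rest (i + 1) = [] := List.map_eq_nil_iff.mp hM
        have hm : hIdx rest (i + 1) = (i + 1) + rest.length := by
          simp [hIdx, hM]
        rw [hA] at ihv ⊢
        simp only [List.map_nil, List.nil_append, List.tail_cons, List.zip_nil_left,
          List.flatMap_nil, List.append_nil] at ihv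
        simp only [List.nil_append, List.zip_cons_cons, List.zip_nil_left,
          List.flatMap_cons, List.flatMap_nil, List.append_nil]
        rw [← ihv, hm]
        rw [show (i + 1) + rest.length - i = ((i + 1) + rest.length - (i + 1)) + 1 by omega,
          List.replicate_succ]
      | cons j js =>
        have hj : hIdx rest (i + 1) = j := by
          simp [hIdx, hM]
        have hge : i + 1 ≤ j := by
          have := hIdx_ge rest (i + 1); omega
        rw [hM, hj] at ihv
        simp only [List.cons_append, List.tail_cons] at ihv
        simp only [List.cons_append, List.zip_cons_cons, List.flatMap_cons]
        rw [show j - i = (j - (i + 1)) + 1 by omega, List.replicate_succ]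
        simp only [List.cons_append]
        rw [ihv]

theorem fillColumn_eq (col : List (Option Int)) : fillColumn col = ffill col (-1) := by
  unfold fillColumn
  rw [foldl_append_repl]
  have h0 : ((anchorsGo col 0).map (·.1) ++ [col.length]).headD 0 = hIdx col 0 := by
    simp [hIdx]
  rw [h0]
  have := fill_go col 0 (-1)
  simpa using this

-- ===== VERDICT (by name: the statement is the Claim_ definition above) =====
theorem handle_nones_spec : Claim_equal_handle_nones := by
  intro ps _
  unfold Spec_handle_nones handle_nones handle_nones_alt
  rw [handle_nones_go_eq, fillColumn_eq, fillColumn_eq]
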